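-- pv_equiv track=rewrite | github.com/the-zebulan/CodeWars | katas/kyu_5/directions_reduction.py | dir_reduc
-- ===== SOURCE A (Python) =====
-- def dir_reduc(directions):
--     opposite = {'NORTH': 'SOUTH', 'EAST': 'WEST',
--                 'SOUTH': 'NORTH', 'WEST': 'EAST'}
--     result = []
--     for direction in directions:
--         if result and result[-1] == opposite[direction]:
--             result.pop()
--         else:
--             result.append(direction)
--     return result
-- ===== SOURCE B (Python) =====
-- def dir_reduc(directions):
--     opposite = {'NORTH': 'SOUTH', 'EAST': 'WEST',
--                 'SOUTH': 'NORTH', 'WEST': 'EAST'}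
--     lst = list(directions)
--     while True:
--         for i in range(len(lst) - 1):
--             if lst[i + 1] == opposite[lst[i]]:
--                 del lst[i:i + 2]
--                 break
--         else:
--             return lst
-- ===== Notes on version B (the rewrite author's own statement) =====
-- stated objective: alternative
-- what changed: B is a fixpoint loop that repeatedly splices out the first adjacent opposite pair until a full scan removes nothing, instead of A's single stack-building pass; Pre_ excludes lists of length >= 2 containing tokens outside the four directions, on which A raises KeyError except in accidental corners (an unknown token met while the stack is empty) where its return value is an artefact of short-circuit evaluation and B itself raises; length <= 1 lists never raise and stay inside Pre_.
-- outside the precondition, e.g. on dir_reduc(['FOO', 'NORTH']): A returns ['FOO', 'NORTH'], B raises KeyError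
import Mathlib
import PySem

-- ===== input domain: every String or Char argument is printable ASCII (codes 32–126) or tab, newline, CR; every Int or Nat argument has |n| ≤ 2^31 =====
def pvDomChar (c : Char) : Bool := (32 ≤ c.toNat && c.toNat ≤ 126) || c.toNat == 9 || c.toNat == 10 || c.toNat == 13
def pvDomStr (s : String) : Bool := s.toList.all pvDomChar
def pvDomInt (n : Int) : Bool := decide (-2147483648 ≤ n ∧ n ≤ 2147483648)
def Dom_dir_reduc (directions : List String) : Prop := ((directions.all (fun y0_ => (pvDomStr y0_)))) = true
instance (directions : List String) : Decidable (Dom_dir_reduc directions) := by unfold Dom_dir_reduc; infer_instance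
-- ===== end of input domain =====

-- B is a fixpoint loop splicing out adjacent opposite pairs instead of A's one stack pass; equal outputs on Pre_ (all tokens are direction words).

-- the dict literal both Pythons define
def pvOpp : PySem.Dict String String :=
  PySem.Dict.ofList [("NORTH", "SOUTH"), ("EAST", "WEST"), ("SOUTH", "NORTH"), ("WEST", "EAST")]

-- ===== PORT A =====
-- one step of A's loop; `opposite[direction]` is a get? (KeyError excluded by Pre_)
def dirStep (result : List String) (direction : String) : List String :=
  if result ≠ [] ∧ result.getLast? = pvOpp.get? direction then
    result.dropLast
  else
    result ++ [direction]

def dir_reduc (directions : List String) : List String :=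
  directions.foldl dirStep []

-- ===== PORT B =====
-- B's inner `for` scan: first adjacent opposite pair spliced out, `none` = no removal
def scanPair : List String → Option (List String)
  | a :: b :: rest =>
      if some b = pvOpp.get? a then some rest
      else (scanPair (b :: rest)).map (fun m => a :: m)
  | _ => none

theorem scanPair_len : ∀ (l l' : List String), scanPair l = some l' → l'.length + 2 = l.length := by
  intro l
  induction l with
  | nil => intro l' h; simp [scanPair] at h
  | cons a t ih =>
    intro l' hsp
    match t with
    | [] => simp [scanPair] at hsp
    | b :: rest =>
      by_cases hb : some b = pvOpp.get? a
      · simp [scanPair, hb] at hsp; subst hsp; simp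
      · simp [scanPair, hb] at hsp
        obtain ⟨m, hm, rfl⟩ := hsp
        have := ih m hm
        simp at this ⊢
        omega

-- B's outer `while True` loop
def dir_reduc_alt (directions : List String) : List String :=
  match h : scanPair directions with
  | none => directions
  | some l => dir_reduc_alt l
  termination_by directions.length
  decreasing_by have := scanPair_len directions l h; omega

-- ===== PRECONDITION & SPEC =====
-- Pre_ excludes lists of length ≥ 2 containing tokens outside the four directions: A raises KeyError on them except in accidental stack-empty corners, where B itself raises; length ≤ 1 lists never raise and stay inside.
def Pre_dir_reduc (directions : List String) : Prop :=
  (∀ d ∈ directions, d = "NORTH" ∨ d = "SOUTH" ∨ d = "EAST" ∨ d = "WEST") ∨ directions.length ≤ 1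
instance (directions : List String) : Decidable (Pre_dir_reduc directions) := by
  unfold Pre_dir_reduc; infer_instance

def pvWitness_dir_reduc : List String := ["NORTH", "WEST", "EAST", "SOUTH", "NORTH"]

def Spec_dir_reduc (directions : List String) (out : List String) : Prop := out = dir_reduc_alt directions
instance (directions : List String) (out : List String) : Decidable (Spec_dir_reduc directions out) := by unfold Spec_dir_reduc; infer_instance

-- ===== CLAIM (what is proved, stated in full; the proofs are below) =====
def Claim_equal_dir_reduc : Prop := ∀ (directions : List String), Dom_dir_reduc directions → Pre_dir_reduc directions → Spec_dir_reduc directions (dir_reduc directions)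

-- ===== LEMMAS AND PROOFS =====

-- A's stack with the most recent element at the head (proof-side view of dirStep)
def revStep (st : List String) (d : String) : List String :=
  match st with
  | t :: s => if some t = pvOpp.get? d then s else d :: t :: s
  | [] => [d]

theorem dirStep_eq (st : List String) (d : String) :
    dirStep st.reverse d = (revStep st d).reverse := by
  match st with
  | [] => simp [dirStep, revStep]
  | t :: s =>
    simp only [revStep, List.reverse_cons, dirStep]
    by_cases h : some t = pvOpp.get? d
    · rw [if_pos, if_pos] <;> simp [h.symm]
    · rw [if_neg, if_neg]
      · simp
      · exact h
      · intro hc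
        exact h (by simpa using hc.2)

theorem foldl_bridge : ∀ (l st : List String),
    List.foldl dirStep st.reverse l = (List.foldl revStep st l).reverse := by
  intro l
  induction l with
  | nil => intro st; simp
  | cons d rest ih =>
    intro st
    simp only [List.foldl_cons]
    rw [dirStep_eq, ih (revStep st d)]

def Known (d : String) : Prop := d = "NORTH" ∨ d = "SOUTH" ∨ d = "EAST" ∨ d = "WEST"

theorem opp_inv {a b : String} (ha : Known a) (h : pvOpp.get? a = some b) :
    pvOpp.get? b = some a := by
  rcases ha with rfl | rfl | rfl | rfl
  · rw [show pvOpp.get? "NORTH" = some "SOUTH" by rfl] at h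
    injection h with h; subst h; rfl
  · rw [show pvOpp.get? "SOUTH" = some "NORTH" by rfl] at h
    injection h with h; subst h; rfl
  · rw [show pvOpp.get? "EAST" = some "WEST" by rfl] at h
    injection h with h; subst h; rfl
  · rw [show pvOpp.get? "WEST" = some "EAST" by rfl] at h
    injection h with h; subst h; rfl

-- invariant of A's (reversed) stack: no element is the opposite of its predecessor
def invR : List String → Prop
  | x :: y :: s => ¬ (some y = pvOpp.get? x) ∧ invR (y :: s)
  | _ => True

theorem invR_tail {y : String} {s : List String} (h : invR (y :: s)) : invR s := by
  match s with
  | [] => trivial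
  | z :: s' => exact h.2

theorem invR_step {st : List String} (d : String) (h : invR st) : invR (revStep st d) := by
  match st with
  | [] => simp [revStep, invR]
  | t :: s =>
    simp only [revStep]
    by_cases hc : some t = pvOpp.get? d
    · rw [if_pos hc]; exact invR_tail h
    · rw [if_neg hc]; exact ⟨hc, h⟩

theorem scanPair_mem : ∀ (l l' : List String), scanPair l = some l' → ∀ x ∈ l', x ∈ l := by
  intro l
  induction l with
  | nil => intro l' h; simp [scanPair] at h
  | cons a t ih =>
    intro l' h x hx
    match t with
    | [] => simp [scanPair] at h
    | b :: rest =>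
      by_cases hb : some b = pvOpp.get? a
      · simp [scanPair, hb] at h; subst h; simp [hx]
      · simp [scanPair, hb] at h
        obtain ⟨m, hm, rfl⟩ := h
        rcases List.mem_cons.mp hx with rfl | hx
        · exact List.mem_cons_self
        · exact List.mem_cons_of_mem _ (ih m hm x hx)

-- a full scan that removes nothing: A never pops, so the stack just accumulates the list
theorem noneAux : ∀ (l st : List String),
    (∀ d ∈ l, Known d) → scanPair l = none →
    (∀ a, l.head? = some a → ∀ t s, st = t :: s → ¬ (some t = pvOpp.get? a)) →
    List.foldl revStep st l = l.reverse ++ st := by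
  intro l
  induction l with
  | nil => intro st _ _ _; simp
  | cons a rest ih =>
    intro st hk hn hh
    have hstep : revStep st a = a :: st := by
      match st with
      | [] => rfl
      | t :: s =>
        have := hh a rfl t s rfl
        simp only [revStep]
        rw [if_neg this]
    simp only [List.foldl_cons, hstep]
    have hrest : scanPair rest = none := by
      match rest with
      | [] => rfl
      | b :: r =>
        by_cases hb : some b = pvOpp.get? a
        · simp [scanPair, hb] at hn
        · simp [scanPair, hb] at hn
          simp [hn]
    have hka : Known a := hk a (by simp)
    have hh' : ∀ b, rest.head? = some b → ∀ t s, (a :: st) = t :: s → ¬ (some t = pvOpp.get? b) := by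
      intro b hb t s hts hop
      injection hts with ht hs
      subst ht; subst hs
      -- a = opp b would give b = opp a, contradicting that the scan removed nothing
      cases rest with
      | nil => simp at hb
      | cons b' r =>
        have hbb : b' = b := by simpa using hb
        have hkb : Known b' := hk b' (by simp)
        have hab : pvOpp.get? b' = some a := by rw [hbb]; exact hop.symm
        have : pvOpp.get? a = some b' := opp_inv hkb hab
        simp [scanPair, this.symm] at hn
    have := ih (a :: st) (fun d hd => hk d (by simp [hd])) hrest hh'
    rw [this]; simp

-- splicing out the pair scanPair found does not change A's result
theorem someAux : ∀ (l l' st : List String),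
    (∀ d ∈ l, Known d) → invR st → scanPair l = some l' →
    List.foldl revStep st l = List.foldl revStep st l' := by
  intro l
  induction l with
  | nil => intro l' st _ _ h; simp [scanPair] at h
  | cons a t ih =>
    intro l' st hk hinv h
    match t with
    | [] => simp [scanPair] at h
    | b :: rest =>
      have hka : Known a := hk a (by simp)
      by_cases hb : some b = pvOpp.get? a
      · simp [scanPair, hb] at h
        subst h
        -- two steps cancel back to st
        have hba : pvOpp.get? b = some a := opp_inv hka hb.symm
        simp only [List.foldl_cons]
        congr 1
        match st with
        | [] => simp only [revStep]
                rw [if_pos (by rw [hba])]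
        | t :: s =>
          by_cases hta : some t = pvOpp.get? a
          · -- pop a's opposite t; pushing b (= t) back restores the stack
            have htb : t = b := by
              rw [← hb] at hta; exact (Option.some_injective _ hta)
            simp only [revStep, if_pos hta]
            subst htb
            match s with
            | [] => rfl
            | u :: s' =>
              have : ¬ (some u = pvOpp.get? t) := hinv.1
              show (if some u = pvOpp.get? t then s' else t :: u :: s') = t :: u :: s'
              rw [if_neg this]
          · simp only [revStep, if_neg hta]
            simp [hba]
      · simp [scanPair, hb] at h
        obtain ⟨m, hm, rfl⟩ := h
        simp only [List.foldl_cons]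
        exact ih m (revStep st a) (fun d hd => hk d (by simp [hd])) (invR_step a hinv) hm

theorem main_aux : ∀ (n : ℕ) (l : List String), l.length ≤ n → (∀ d ∈ l, Known d) →
    (List.foldl revStep [] l).reverse = dir_reduc_alt l := by
  intro n
  induction n with
  | zero =>
    intro l hl _
    have : l = [] := List.eq_nil_of_length_eq_zero (Nat.le_zero.mp hl)
    subst this
    rw [dir_reduc_alt]
    rfl
  | succ n ih =>
    intro l hl hk
    rw [dir_reduc_alt]
    cases h : scanPair l with
    | none =>
      rw [noneAux l [] hk h (by intro a _ t s hts _; simp at hts)]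
      simp
    | some l' =>
      rw [someAux l l' [] hk trivial h]
      have hlen := scanPair_len l l' h
      exact ih l' (by omega) (fun d hd => hk d (scanPair_mem l l' h d hd))

-- ===== VERDICT (by name: the statement is the Claim_ definition above) =====
theorem dir_reduc_spec : Claim_equal_dir_reduc := by
  intro directions _ hpre
  rcases hpre with hpre | hshort
  case inr =>
    -- lists of length ≤ 1: both programs return the list unchanged, whatever its tokens
    match directions, hshort with
    | [], _ =>
      show dir_reduc [] = dir_reduc_alt []
      rw [dir_reduc_alt]
      rfl
    | [x], _ =>
      show dir_reduc [x] = dir_reduc_alt [x]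
      rw [dir_reduc_alt]
      show dirStep [] x = _
      rw [show dirStep [] x = [x] by simp [dirStep]]
      rfl
  unfold Spec_dir_reduc dir_reduc
  have : (([] : List String)).reverse = ([] : List String) := rfl
  rw [show ([] : List String) = ([] : List String).reverse from rfl, foldl_bridge]
  exact main_aux directions.length directions le_rfl hpre
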